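-- pv_equiv track=rewrite | github.com/AKleriX/codewars-tasks | Sum of all numbers with the same digits (performance edition)/task-solution.py | sum_arrangements
-- ===== SOURCE A (Python) =====
-- import math
--
-- def sum_arrangements(num):
--     s = str(num)
--     n = len(s)
--     sd = 0
--     for c in s:
--         sd += ord(c) - 48
--     f = math.factorial(n - 1)
--     repunit = (10**n - 1) // 9
--     return sd * f * repunit
-- ===== SOURCE B (Python) =====
-- import math
--
--
-- def _decs(digits, state):
--     # one entry per position i of state: (digits[i], state[i], state with
--     # state[i] decremented), in order
--     if not state:
--         return []
--     d, c = digits[0], state[0]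
--     head = (d, c, [c - 1] + state[1:])
--     return [head] + [(e, k, [c] + rest) for (e, k, rest) in _decs(digits[1:], state[1:])]
--
--
-- def _solve(digits, state, memo):
--     # sum of the values of all position-permutations of the multiset described
--     # by (digits, state); memoised on the count vector
--     n = sum(state)
--     if n == 0:
--         return 0
--     key = tuple(state)
--     if key in memo:
--         return memo[key]
--     f = math.factorial(n - 1)
--     total = 0
--     for (d, c, rest) in _decs(digits, state):
--         if c > 0:
--             total += c * (d * 10 ** (n - 1) * f + _solve(digits, rest, memo))
--     memo[key] = total
--     return total
--
--
-- def sum_arrangements(num):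
--     vals = [ord(ch) - 48 for ch in str(num)]
--     digits = list(dict.fromkeys(vals))
--     state = [vals.count(d) for d in digits]
--     return _solve(digits, state, {})
-- ===== Notes on version B (the rewrite author's own statement) =====
-- stated objective: alternative
-- what changed: A evaluates the closed formula digit_sum * (n-1)! * repunit(n); B never uses that formula for the result: it builds the digit multiset of str(num) and computes the sum of the values of all position-permutations by a memoised recursion over count vectors (pick each first digit, recurse on the decremented multiset).
import Mathlib
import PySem

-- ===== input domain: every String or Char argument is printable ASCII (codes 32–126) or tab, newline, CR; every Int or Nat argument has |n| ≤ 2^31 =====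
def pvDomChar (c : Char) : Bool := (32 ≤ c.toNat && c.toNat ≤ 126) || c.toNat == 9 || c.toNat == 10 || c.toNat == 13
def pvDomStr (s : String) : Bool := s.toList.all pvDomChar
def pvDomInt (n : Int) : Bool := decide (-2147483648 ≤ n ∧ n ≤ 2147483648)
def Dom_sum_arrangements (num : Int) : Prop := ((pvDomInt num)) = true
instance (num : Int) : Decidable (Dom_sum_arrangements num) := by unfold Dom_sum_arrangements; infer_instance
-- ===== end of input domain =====

-- B replaces A's closed formula by a memoised recursion over digit-count multisets
-- (a genuinely different algorithm of similar cost); equivalence is proved for every num.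

-- ===== PORT A =====
-- literal transliteration of A: s = str(num); sd = Σ (ord(c)-48); sd * (n-1)! * ((10^n-1)//9)
def sum_arrangements (num : Int) : Int :=
  let s := PySem.Int.toChars num          -- str(num), as its character list
  let n := s.length                        -- n = len(s)
  let sd := s.foldl (fun sd c => sd + ((c.toNat : Int) - 48)) 0   -- ord(c) - 48
  let f : Int := (Nat.factorial (n - 1) : Int)                    -- math.factorial(n - 1)
  let repunit := PySem.Int.floordiv ((10 : Int) ^ n - 1) 9        -- (10**n - 1) // 9
  sd * f * repunit

-- ===== PORT B =====
-- _decs(digits, state): one entry (digits[i], state[i], state with state[i] decremented)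
-- per position i, in order.  (Python raises IndexError when digits is shorter than state;
-- _solve only ever calls it on aligned lists, so the [] in that arm is unreachable.)
def pvDecs : List Int → List Int → List (Int × Int × List Int)
  | _, [] => []
  | [], _ :: _ => []
  | d :: ds, c :: cs =>
      (d, c, (c - 1) :: cs) :: (pvDecs ds cs).map (fun t => (t.1, t.2.1, c :: t.2.2))

-- termination measure for the port of _solve: the total remaining count
def pvTot (cs : List Int) : Nat := (cs.map Int.toNat).sum

theorem pvDecs_tot {ds cs : List Int} {t : Int × Int × List Int}
    (ht : t ∈ pvDecs ds cs) (hc : 0 < t.2.1) : pvTot t.2.2 + 1 = pvTot cs := by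
  induction cs generalizing ds t with
  | nil => cases ds <;> simp [pvDecs] at ht
  | cons c cs ih =>
    cases ds with
    | nil => simp [pvDecs] at ht
    | cons d ds =>
      simp only [pvDecs, List.mem_cons, List.mem_map] at ht
      rcases ht with h | ⟨u, hu, hut⟩
      · subst h
        have hc2 : 0 < c := hc
        show pvTot ((c - 1) :: cs) + 1 = pvTot (c :: cs)
        simp only [pvTot, List.map_cons, List.sum_cons]
        omega
      · have hc' : 0 < u.2.1 := by
          have h1 : t.2.1 = u.2.1 := by rw [← hut]
          omega
        have := ih hu hc'
        have ht2 : t.2.2 = c :: u.2.2 := by rw [← hut]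
        rw [ht2]
        simp only [pvTot, List.map_cons, List.sum_cons] at *
        omega

-- math.factorial
def pvFact (n : Nat) : Int := (Nat.factorial n : Int)

-- _solve(digits, state, memo): sum of the values of all position-permutations of the
-- multiset {digits[i] with multiplicity state[i]}, memoised on state.  The Python
-- mutates the memo dict in place; the port threads it (result, updated memo).
def pvSolve (ds : List Int) (cs : List Int) (memo : PySem.Dict (List Int) Int) :
    Int × PySem.Dict (List Int) Int :=
  if cs.sum = 0 then (0, memo)
  else
    match memo.get? cs with
    | some v => (v, memo)
    | none =>
      let r := (pvDecs ds cs).attach.foldl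
        (fun (p : Int × PySem.Dict (List Int) Int) t =>
          if h : 0 < t.1.2.1 then
            let q := pvSolve ds t.1.2.2 p.2
            (p.1 + t.1.2.1 * (t.1.1 * 10 ^ (cs.sum - 1).toNat * pvFact (cs.sum - 1).toNat + q.1),
             q.2)
          else p)
        (0, memo)
      (r.1, r.2.insert cs r.1)
  termination_by pvTot cs
  decreasing_by
    have := pvDecs_tot t.2 h; omega

def sum_arrangements_alt (num : Int) : Int :=
  let vals := (PySem.Int.toChars num).map (fun ch => ((ch.toNat : Int) - 48))
  let digits := PySem.List.dedup vals                                -- list(dict.fromkeys(vals))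
  let state := digits.map (fun d => ((PySem.List.count vals d : Nat) : Int))  -- vals.count(d)
  (pvSolve digits state PySem.Dict.empty).1

-- ===== PRECONDITION & SPEC =====
def Spec_sum_arrangements (num : Int) (out : Int) : Prop := out = sum_arrangements_alt num
instance (num : Int) (out : Int) : Decidable (Spec_sum_arrangements num out) := by
  unfold Spec_sum_arrangements; infer_instance

-- ===== CLAIM (what is proved, stated in full; the proofs are below) =====
def Claim_equal_sum_arrangements : Prop :=
  ∀ (num : Int), Dom_sum_arrangements num → Spec_sum_arrangements num (sum_arrangements num)

-- ===== LEMMAS AND PROOFS =====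

-- the memo-free version of _solve (proof device: what each memo entry caches)
def pvPure (ds : List Int) (cs : List Int) : Int :=
  if cs.sum = 0 then 0
  else
    (pvDecs ds cs).attach.foldl
      (fun tot t =>
        if h : 0 < t.1.2.1 then
          tot + t.1.2.1 * (t.1.1 * 10 ^ (cs.sum - 1).toNat * pvFact (cs.sum - 1).toNat
                           + pvPure ds t.1.2.2)
        else tot)
      0
  termination_by pvTot cs
  decreasing_by
    have := pvDecs_tot t.2 h; omega

-- weighted digit sum Σ digits[i] * state[i]
def pvW : List Int → List Int → Int
  | _, [] => 0
  | [], _ :: _ => 0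
  | d :: ds, c :: cs => d * c + pvW ds cs

-- repunit(n) = (10^n - 1)/9
def pvRep : Nat → Int
  | 0 => 0
  | n + 1 => 10 ^ n + pvRep n

-- memo invariant: every cached value is the memo-free result
def pvInv (ds : List Int) (m : PySem.Dict (List Int) Int) : Prop :=
  ∀ k v, m.get? k = some v → v = pvPure ds k

theorem pvDecs_len {ds cs : List Int} {t : Int × Int × List Int}
    (ht : t ∈ pvDecs ds cs) : t.2.2.length = cs.length := by
  induction cs generalizing ds t with
  | nil => cases ds <;> simp [pvDecs] at ht
  | cons c cs ih =>
    cases ds with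
    | nil => simp [pvDecs] at ht
    | cons d ds =>
      simp only [pvDecs, List.mem_cons, List.mem_map] at ht
      rcases ht with h | ⟨u, hu, hut⟩
      · subst h; simp
      · have := ih hu
        have ht2 : t.2.2 = c :: u.2.2 := by rw [← hut]
        rw [ht2]; simp [this]

theorem pvDecs_nonneg {ds cs : List Int} {t : Int × Int × List Int}
    (ht : t ∈ pvDecs ds cs) (hc : 0 < t.2.1) (hnn : ∀ x ∈ cs, 0 ≤ x) :
    ∀ x ∈ t.2.2, 0 ≤ x := by
  induction cs generalizing ds t with
  | nil => cases ds <;> simp [pvDecs] at ht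
  | cons c cs ih =>
    cases ds with
    | nil => simp [pvDecs] at ht
    | cons d ds =>
      simp only [pvDecs, List.mem_cons, List.mem_map] at ht
      rcases ht with h | ⟨u, hu, hut⟩
      · subst h
        intro x hx
        rcases List.mem_cons.mp hx with h | h
        · subst h; simp only at hc ⊢; omega
        · exact hnn x (List.mem_cons_of_mem _ h)
      · have hc' : 0 < u.2.1 := by
          have h1 : t.2.1 = u.2.1 := by rw [← hut]
          omega
        have hrec := ih hu hc' (fun x hx => hnn x (List.mem_cons_of_mem _ hx))
        have ht2 : t.2.2 = c :: u.2.2 := by rw [← hut]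
        rw [ht2]
        intro x hx
        rcases List.mem_cons.mp hx with h | h
        · subst h; exact hnn _ List.mem_cons_self
        · exact hrec x h

theorem pvDecs_W {ds cs : List Int} {t : Int × Int × List Int}
    (ht : t ∈ pvDecs ds cs) : pvW ds t.2.2 = pvW ds cs - t.1 := by
  induction cs generalizing ds t with
  | nil => cases ds <;> simp [pvDecs] at ht
  | cons c cs ih =>
    cases ds with
    | nil => simp [pvDecs] at ht
    | cons d ds =>
      simp only [pvDecs, List.mem_cons, List.mem_map] at ht
      rcases ht with h | ⟨u, hu, hut⟩
      · subst h; simp only [pvW]; ring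
      · have := ih hu
        have ht2 : t.2.2 = c :: u.2.2 := by rw [← hut]
        have ht1 : t.1 = u.1 := by rw [← hut]
        rw [ht2, ht1]
        simp only [pvW] at *
        omega

theorem pvDecs_map {β : Type} (g : Int → Int → β) :
    ∀ (ds cs : List Int),
      (pvDecs ds cs).map (fun t => g t.1 t.2.1) = (ds.zip cs).map (fun p => g p.1 p.2) := by
  intro ds cs
  induction cs generalizing ds with
  | nil => cases ds <;> simp [pvDecs]
  | cons c cs ih =>
    cases ds with
    | nil => simp [pvDecs]
    | cons d ds =>
      simp only [pvDecs, List.map_cons, List.map_map, List.zip_cons_cons]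
      congr 1
      rw [← ih ds]
      rfl

theorem pv_sumtot {cs : List Int} (hnn : ∀ x ∈ cs, 0 ≤ x) : cs.sum = (pvTot cs : Int) := by
  induction cs with
  | nil => simp [pvTot]
  | cons c cs ih =>
    have h1 := hnn c List.mem_cons_self
    have h2 := ih (fun x hx => hnn x (List.mem_cons_of_mem _ hx))
    simp only [pvTot, List.map_cons, List.sum_cons] at *
    omega

theorem pv_zipW : ∀ (ds cs : List Int), (∀ x ∈ cs, 0 ≤ x) →
    ((ds.zip cs).map (fun p => if 0 < p.2 then p.2 * p.1 else 0)).sum = pvW ds cs := by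
  intro ds cs
  induction cs generalizing ds with
  | nil => cases ds <;> simp [pvW]
  | cons c cs ih =>
    cases ds with
    | nil => simp [pvW]
    | cons d ds =>
      intro hnn
      have h1 := hnn c List.mem_cons_self
      have h2 := ih ds (fun x hx => hnn x (List.mem_cons_of_mem _ hx))
      simp only [List.zip_cons_cons, List.map_cons, List.sum_cons, h2]
      by_cases hc : 0 < c
      · simp only [if_pos hc, pvW]; ring
      · have hc0 : c = 0 := by omega
        simp [hc0, pvW]

theorem pv_zipC : ∀ (ds cs : List Int), (∀ x ∈ cs, 0 ≤ x) → ds.length = cs.length →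
    ((ds.zip cs).map (fun p => if 0 < p.2 then p.2 else 0)).sum = cs.sum := by
  intro ds cs
  induction cs generalizing ds with
  | nil => cases ds <;> simp
  | cons c cs ih =>
    cases ds with
    | nil => intro _ h; simp at h
    | cons d ds =>
      intro hnn hlen
      have h1 := hnn c List.mem_cons_self
      have h2 := ih ds (fun x hx => hnn x (List.mem_cons_of_mem _ hx)) (by simpa using hlen)
      simp only [List.zip_cons_cons, List.map_cons, List.sum_cons, h2]
      by_cases hc : 0 < c
      · simp [hc]
      · have hc0 : c = 0 := by omega
        simp [hc0]

-- a guarded accumulating fold is init + a sum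
theorem pv_foldl_if_sum {β : Type} (P : β → Prop) [DecidablePred P] (F : β → Int) :
    ∀ (L : List β) (a : Int),
      L.foldl (fun tot x => if P x then tot + F x else tot) a
        = a + (L.map (fun x => if P x then F x else 0)).sum := by
  intro L
  induction L with
  | nil => simp
  | cons x L ih =>
    intro a
    simp only [List.foldl_cons, List.map_cons, List.sum_cons, ih]
    by_cases h : P x <;> simp [h] <;> ring

-- the key factorial/repunit identity behind the recursion step
theorem pv_key (m : Nat) (hm : 1 ≤ m) :
    10 ^ (m - 1) * pvFact (m - 1) + ((m : Int) - 1) * (pvFact (m - 1 - 1) * pvRep (m - 1))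
      = pvFact (m - 1) * pvRep m := by
  match m, hm with
  | 1, _ => simp [pvFact, pvRep, Nat.factorial]
  | (k + 2), _ =>
    have h1 : k + 2 - 1 = k + 1 := rfl
    rw [h1]
    have h2 : k + 1 - 1 = k := rfl
    rw [h2]
    have hf : pvFact (k + 1) = ((k : Int) + 1) * pvFact k := by
      simp only [pvFact, Nat.factorial_succ]
      push_cast; ring
    have hr : pvRep (k + 2) = 10 ^ (k + 1) + pvRep (k + 1) := rfl
    rw [hr, hf]
    push_cast
    ring

theorem pvPure_spec : ∀ (N : Nat) (ds cs : List Int), pvTot cs ≤ N →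
    ds.length = cs.length → (∀ x ∈ cs, 0 ≤ x) →
    pvPure ds cs = pvW ds cs * pvFact (pvTot cs - 1) * pvRep (pvTot cs) := by
  intro N
  induction N with
  | zero =>
    intro ds cs h0 _ hnn
    have hm : pvTot cs = 0 := by omega
    have hs : cs.sum = 0 := by rw [pv_sumtot hnn, hm]; rfl
    rw [pvPure, if_pos hs, hm]
    simp [pvRep]
  | succ N ih =>
    intro ds cs hN hlen hnn
    by_cases hm0 : pvTot cs = 0
    · have hs : cs.sum = 0 := by rw [pv_sumtot hnn, hm0]; rfl
      rw [pvPure, if_pos hs, hm0]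
      simp [pvRep]
    · have hm1 : 1 ≤ pvTot cs := by omega
      have hs : cs.sum = ((pvTot cs : Nat) : Int) := pv_sumtot hnn
      have hs0 : cs.sum ≠ 0 := by
        rw [hs]
        exact_mod_cast (by omega : ((pvTot cs : Nat) : Int) ≠ 0)
      have hst : (cs.sum - 1).toNat = pvTot cs - 1 := by rw [hs]; omega
      rw [pvPure, if_neg hs0]
      have hshape :
          (fun (tot : Int) (t : {x // x ∈ pvDecs ds cs}) =>
              if _ : 0 < t.1.2.1 then
                tot + t.1.2.1 * (t.1.1 * 10 ^ (cs.sum - 1).toNat * pvFact (cs.sum - 1).toNat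
                                 + pvPure ds t.1.2.2)
              else tot)
            = (fun tot t =>
                if 0 < (t : {x // x ∈ pvDecs ds cs}).1.2.1 then
                  tot + t.1.2.1 * (t.1.1 * 10 ^ (cs.sum - 1).toNat * pvFact (cs.sum - 1).toNat
                                   + pvPure ds t.1.2.2)
                else tot) := by
        funext tot t; rw [dite_eq_ite]
      rw [hshape,
          pv_foldl_if_sum (fun t : {x // x ∈ pvDecs ds cs} => 0 < t.1.2.1)
            (fun t => t.1.2.1 * (t.1.1 * 10 ^ (cs.sum - 1).toNat * pvFact (cs.sum - 1).toNat
                                 + pvPure ds t.1.2.2))]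
      have hmap : ((pvDecs ds cs).attach.map
            (fun t => if 0 < t.1.2.1 then
                t.1.2.1 * (t.1.1 * 10 ^ (cs.sum - 1).toNat * pvFact (cs.sum - 1).toNat
                           + pvPure ds t.1.2.2)
              else 0)).sum
          = ((pvDecs ds cs).attach.map
            (fun t => (if 0 < t.1.2.1 then t.1.2.1 * t.1.1 else 0)
                        * (10 ^ (pvTot cs - 1) * pvFact (pvTot cs - 1)
                           - pvFact (pvTot cs - 1 - 1) * pvRep (pvTot cs - 1))
                      + (if 0 < t.1.2.1 then t.1.2.1 else 0)
                        * (pvW ds cs * (pvFact (pvTot cs - 1 - 1) * pvRep (pvTot cs - 1))))).sum := by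
        apply congrArg
        apply List.map_congr_left
        intro t _
        by_cases hc : 0 < t.1.2.1
        · have htot : pvTot t.1.2.2 + 1 = pvTot cs := pvDecs_tot t.2 hc
          have hrec : pvPure ds t.1.2.2
              = pvW ds t.1.2.2 * pvFact (pvTot t.1.2.2 - 1) * pvRep (pvTot t.1.2.2) := by
            apply ih
            · omega
            · rw [hlen]; exact (pvDecs_len t.2).symm
            · exact pvDecs_nonneg t.2 hc hnn
          have hW : pvW ds t.1.2.2 = pvW ds cs - t.1.1 := pvDecs_W t.2
          have htot' : pvTot t.1.2.2 = pvTot cs - 1 := by omega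
          rw [hrec, hW, htot', hst]
          simp only [if_pos hc]
          ring
        · simp [hc]
      rw [hmap]
      rw [PySem.List.sum_map_add_int]
      rw [List.sum_map_mul_right, List.sum_map_mul_right]
      have e1 : ((pvDecs ds cs).attach.map
            (fun t => if 0 < t.1.2.1 then t.1.2.1 * t.1.1 else 0)).sum = pvW ds cs := by
        have ha : ((pvDecs ds cs).attach.map
              (fun t => if 0 < t.1.2.1 then t.1.2.1 * t.1.1 else 0))
            = (pvDecs ds cs).map (fun t => if 0 < t.2.1 then t.2.1 * t.1 else 0) :=
          List.attach_map_val (l := pvDecs ds cs)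
            (f := fun t => if 0 < t.2.1 then t.2.1 * t.1 else 0)
        rw [ha, pvDecs_map (fun a b => if 0 < b then b * a else 0) ds cs]
        exact pv_zipW ds cs hnn
      have e2 : ((pvDecs ds cs).attach.map
            (fun t => if 0 < t.1.2.1 then t.1.2.1 else 0)).sum = ((pvTot cs : Nat) : Int) := by
        have ha : ((pvDecs ds cs).attach.map
              (fun t => if 0 < t.1.2.1 then t.1.2.1 else 0))
            = (pvDecs ds cs).map (fun t => if 0 < t.2.1 then t.2.1 else 0) :=
          List.attach_map_val (l := pvDecs ds cs)
            (f := fun t => if 0 < t.2.1 then t.2.1 else 0)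
        rw [ha, pvDecs_map (fun a b => if 0 < b then b else 0) ds cs]
        rw [pv_zipC ds cs hnn hlen]
        exact hs
      rw [e1, e2]
      have hkey := pv_key (pvTot cs) hm1
      linear_combination (pvW ds cs) * hkey

-- the memoised fold computes the same running total as the memo-free fold,
-- and preserves the memo invariant
theorem pvSolve_fold (ds cs : List Int)
    (Hrec : ∀ t ∈ pvDecs ds cs, 0 < t.2.1 → ∀ m', pvInv ds m' →
      (pvSolve ds t.2.2 m').1 = pvPure ds t.2.2 ∧ pvInv ds (pvSolve ds t.2.2 m').2) :
    ∀ (L : List {x // x ∈ pvDecs ds cs}) (tot : Int) (memo : PySem.Dict (List Int) Int),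
      pvInv ds memo →
      (L.foldl
          (fun (p : Int × PySem.Dict (List Int) Int) t =>
            if h : 0 < t.1.2.1 then
              let q := pvSolve ds t.1.2.2 p.2
              (p.1 + t.1.2.1 * (t.1.1 * 10 ^ (cs.sum - 1).toNat * pvFact (cs.sum - 1).toNat + q.1),
               q.2)
            else p)
          (tot, memo)).1
        = L.foldl
            (fun tot t =>
              if h : 0 < t.1.2.1 then
                tot + t.1.2.1 * (t.1.1 * 10 ^ (cs.sum - 1).toNat * pvFact (cs.sum - 1).toNat
                                 + pvPure ds t.1.2.2)
              else tot)
            tot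
      ∧ pvInv ds
          (L.foldl
            (fun (p : Int × PySem.Dict (List Int) Int) t =>
              if h : 0 < t.1.2.1 then
                let q := pvSolve ds t.1.2.2 p.2
                (p.1 + t.1.2.1 * (t.1.1 * 10 ^ (cs.sum - 1).toNat * pvFact (cs.sum - 1).toNat + q.1),
                 q.2)
              else p)
            (tot, memo)).2 := by
  intro L
  induction L with
  | nil => intro tot memo hi; exact ⟨rfl, hi⟩
  | cons t L ih =>
    intro tot memo hi
    by_cases h : 0 < t.1.2.1
    · obtain ⟨hq1, hq2⟩ := Hrec t.1 t.2 h memo hi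
      simp only [List.foldl_cons, dif_pos h]
      rw [hq1]
      exact ih _ _ hq2
    · simp only [List.foldl_cons, dif_neg h]
      exact ih _ _ hi

theorem pvSolve_correct : ∀ (N : Nat) (ds cs : List Int), pvTot cs < N →
    ∀ memo, pvInv ds memo →
      (pvSolve ds cs memo).1 = pvPure ds cs ∧ pvInv ds (pvSolve ds cs memo).2 := by
  intro N
  induction N with
  | zero => intro ds cs h; omega
  | succ N ih =>
    intro ds cs hN memo hInv
    rw [pvSolve]
    by_cases hs : cs.sum = 0
    · rw [if_pos hs, pvPure, if_pos hs]
      exact ⟨rfl, hInv⟩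
    · rw [if_neg hs]
      cases hmg : memo.get? cs with
      | some v =>
        simp only
        exact ⟨hInv cs v hmg, hInv⟩
      | none =>
        simp only
        have Hrec : ∀ t ∈ pvDecs ds cs, 0 < t.2.1 → ∀ m', pvInv ds m' →
            (pvSolve ds t.2.2 m').1 = pvPure ds t.2.2 ∧ pvInv ds (pvSolve ds t.2.2 m').2 := by
          intro t ht hc m' hi
          have := pvDecs_tot ht hc
          exact ih ds t.2.2 (by omega) m' hi
        obtain ⟨h1, h2⟩ := pvSolve_fold ds cs Hrec (pvDecs ds cs).attach 0 memo hInv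
        have hpv : pvPure ds cs
            = (pvDecs ds cs).attach.foldl
                (fun tot t =>
                  if h : 0 < t.1.2.1 then
                    tot + t.1.2.1 * (t.1.1 * 10 ^ (cs.sum - 1).toNat * pvFact (cs.sum - 1).toNat
                                     + pvPure ds t.1.2.2)
                  else tot)
                0 := by
          rw [pvPure, if_neg hs]
        constructor
        · rw [h1, ← hpv]
        · intro k v hk
          rw [PySem.Dict.get?_insert] at hk
          by_cases hkc : k = cs
          · rw [if_pos hkc] at hk
            have hv : v = _ := (Option.some_injective _ hk.symm)
            rw [hkc, ← hv.symm] at *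
            rw [← hv]
            rw [h1, ← hpv, hkc]
          · rw [if_neg hkc] at hk
            exact h2 k v hk

-- sum of an indicator map over a Nodup list containing v
theorem pv_zero_sum (ks : List Int) (v : Int) (x : Int → Int) (h : ∀ d ∈ ks, d ≠ v) :
    (ks.map (fun d => if d = v then x d else 0)).sum = 0 := by
  induction ks with
  | nil => simp
  | cons k ks ih =>
    have hk := h k List.mem_cons_self
    simp only [List.map_cons, List.sum_cons, if_neg hk]
    rw [ih (fun d hd => h d (List.mem_cons_of_mem _ hd))]
    ring

theorem pv_ind_sum (ks : List Int) (v : Int) (x : Int → Int) (hnd : ks.Nodup) (hv : v ∈ ks) :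
    (ks.map (fun d => if d = v then x d else 0)).sum = x v := by
  induction ks with
  | nil => simp at hv
  | cons k ks ih =>
    rcases List.mem_cons.mp hv with h | h
    · simp only [List.map_cons, List.sum_cons, if_pos h.symm]
      have hnotin : k ∉ ks := (List.nodup_cons.mp hnd).1
      rw [pv_zero_sum ks v x (fun d hd hdv => hnotin ((hdv.trans h) ▸ hd))]
      rw [← h]
      ring
    · have hk : k ≠ v := by
        intro hkv
        exact (List.nodup_cons.mp hnd).1 (hkv ▸ h)
      simp only [List.map_cons, List.sum_cons, if_neg hk]
      rw [ih (List.nodup_cons.mp hnd).2 h]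
      ring

-- Σ_{d ∈ ks} w(d) * count(vals, d) = Σ_{y ∈ vals} w(y), for ks ⊇ vals without duplicates
theorem pv_count_sum (w : Int → Int) :
    ∀ (vals ks : List Int), ks.Nodup → (∀ y ∈ vals, y ∈ ks) →
      (ks.map (fun d => w d * ((PySem.List.count vals d : Nat) : Int))).sum
        = (vals.map w).sum := by
  intro vals
  induction vals with
  | nil =>
    intro ks _ _
    simp [PySem.List.count_eq]
  | cons v vals ih =>
    intro ks hnd hmem
    have hv : v ∈ ks := hmem v List.mem_cons_self
    have hstep : (ks.map (fun d => w d * ((PySem.List.count (v :: vals) d : Nat) : Int)))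
        = ks.map (fun d => w d * ((PySem.List.count vals d : Nat) : Int)
                    + (if d = v then w d else 0)) := by
      apply List.map_congr_left
      intro d _
      by_cases hdv : d = v
      · have hcnt : PySem.List.count (v :: vals) d = PySem.List.count vals d + 1 := by
          simp [PySem.List.count_eq, List.count_cons, hdv]
        rw [hcnt, if_pos hdv]
        push_cast
        ring
      · have hcnt : PySem.List.count (v :: vals) d = PySem.List.count vals d := by
          have hvd : ¬v = d := fun hh => hdv hh.symm
          simp [PySem.List.count_eq, List.count_cons, hvd]
        rw [hcnt, if_neg hdv]
        ring
    rw [hstep, PySem.List.sum_map_add_int,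
        ih ks hnd (fun y hy => hmem y (List.mem_cons_of_mem _ hy)),
        pv_ind_sum ks v w hnd hv]
    simp only [List.map_cons, List.sum_cons]
    ring

theorem pvW_map (f : Int → Int) : ∀ ds : List Int,
    pvW ds (ds.map f) = (ds.map (fun d => d * f d)).sum := by
  intro ds
  induction ds with
  | nil => simp [pvW]
  | cons d ds ih => simp [pvW, ih]

theorem pv_nine : ∀ n : Nat, 9 * pvRep n = 10 ^ n - 1 := by
  intro n
  induction n with
  | zero => simp [pvRep]
  | succ n ih =>
    simp only [pvRep]
    linear_combination ih

theorem pv_repdiv (n : Nat) : PySem.Int.floordiv ((10 : Int) ^ n - 1) 9 = pvRep n := by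
  rw [PySem.Int.floordiv_eq_ediv_of_pos (by norm_num), ← pv_nine n,
      Int.mul_ediv_cancel_left _ (by norm_num)]

theorem pv_inv_empty (ds : List Int) : pvInv ds PySem.Dict.empty := by
  intro k v hk
  rw [PySem.Dict.get?_empty] at hk
  cases hk

-- ===== VERDICT (by name: the statement is the Claim_ definition above) =====
theorem sum_arrangements_spec : Claim_equal_sum_arrangements := by
  unfold Claim_equal_sum_arrangements Spec_sum_arrangements
  intro num _
  simp only [sum_arrangements, sum_arrangements_alt]
  set s := PySem.Int.toChars num with hsdef
  set vals := s.map (fun ch => ((ch.toNat : Int) - 48)) with hvals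
  set ds := PySem.List.dedup vals with hds
  set state := ds.map (fun d => ((PySem.List.count vals d : Nat) : Int)) with hstate
  have hnd : ds.Nodup := PySem.List.nodup_dedup vals
  have hmem : ∀ y ∈ vals, y ∈ ds := fun y hy => (PySem.List.mem_dedup vals y).mpr hy
  have hnn : ∀ x ∈ state, 0 ≤ x := by
    intro x hx
    rw [hstate] at hx
    obtain ⟨d, _, rfl⟩ := List.mem_map.mp hx
    exact Int.natCast_nonneg _
  have hlen : ds.length = state.length := by rw [hstate, List.length_map]
  -- Σ state = number of digits, as an integer
  have hC : state.sum = (vals.length : Int) := by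
    have h1 : state = ds.map (fun d => (fun _ => (1 : Int)) d
        * ((PySem.List.count vals d : Nat) : Int)) := by
      rw [hstate]; apply List.map_congr_left; intro d _; ring
    rw [h1, pv_count_sum (fun _ => (1 : Int)) vals ds hnd hmem]
    rw [List.map_const']
    simp [List.sum_replicate]
  have hTot : pvTot state = vals.length := by
    have h1 : ((pvTot state : Nat) : Int) = (vals.length : Int) := by
      rw [← pv_sumtot hnn, hC]
    exact_mod_cast h1
  -- weighted sum over the counts is the digit sum
  have hW : pvW ds state = vals.sum := by
    rw [hstate, pvW_map]
    have h1 := pv_count_sum (fun d => d) vals ds hnd hmem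
    rw [h1]
    simp
  -- A's digit-sum loop is Σ vals
  have hsd : s.foldl (fun sd c => sd + ((c.toNat : Int) - 48)) 0 = vals.sum := by
    rw [PySem.List.foldl_add s (fun c => ((c.toNat : Int) - 48)) 0]
    simp [hvals]
  -- B computes the memo-free recursion, which has A's closed form
  have hsolve := (pvSolve_correct (pvTot state + 1) ds state (by omega)
      PySem.Dict.empty (pv_inv_empty ds)).1
  have hpure := pvPure_spec (pvTot state) ds state le_rfl hlen hnn
  have hlenvals : vals.length = s.length := by rw [hvals, List.length_map]
  rw [hsd, hsolve, hpure, hW, hTot, hlenvals, pv_repdiv]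
  rfl
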